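-- pv_equiv track=rewrite | github.com/BU-ISCIII/relecov_2026_drylab_eqa | render_reports.py | normalize_table_spacing
-- ===== SOURCE A (Python) =====
-- from typing import Any, Dict, List, Optional, Sequence, Tuple
--
-- def normalize_table_spacing(markdown_text: str) -> str:
--     lines = markdown_text.splitlines()
--     normalized: List[str] = []
--     total = len(lines)
--
--     for idx, line in enumerate(lines):
--         stripped = line.strip()
--         if stripped.startswith("|"):
--             normalized.append(stripped)
--             continue
--
--         if stripped == "":
--             prev_is_table = bool(normalized and normalized[-1].strip().startswith("|"))
--             next_line = lines[idx + 1].strip() if idx + 1 < total else ""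
--             next_is_table = next_line.startswith("|")
--             if prev_is_table and next_is_table:
--                 continue
--
--         normalized.append(line)
--
--     return "\n".join(normalized)
-- ===== SOURCE B (Python) =====
-- def normalize_table_spacing(markdown_text: str) -> str:
--     out = []
--     pending = []  # buffered blank lines, not yet committed
--     last_was_table = False
--     for line in markdown_text.splitlines():
--         stripped = line.strip()
--         if stripped.startswith("|"):
--             if not (last_was_table and len(pending) == 1):
--                 out.extend(pending)
--             pending = []
--             out.append(stripped)
--             last_was_table = True
--         elif stripped == "":
--             pending.append(line)
--         else:
--             out.extend(pending)
--             pending = []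
--             out.append(line)
--             last_was_table = False
--     out.extend(pending)
--     return "\n".join(out)
-- ===== Notes on version B (the rewrite author's own statement) =====
-- stated objective: alternative
-- what changed: Replaces A's index-based lookahead (lines[idx+1]) and re-inspection of normalized[-1] with a single forward pass that buffers pending blank lines and tracks a last_was_table flag, dropping a lone buffered blank when the next table row arrives.
import Mathlib
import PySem

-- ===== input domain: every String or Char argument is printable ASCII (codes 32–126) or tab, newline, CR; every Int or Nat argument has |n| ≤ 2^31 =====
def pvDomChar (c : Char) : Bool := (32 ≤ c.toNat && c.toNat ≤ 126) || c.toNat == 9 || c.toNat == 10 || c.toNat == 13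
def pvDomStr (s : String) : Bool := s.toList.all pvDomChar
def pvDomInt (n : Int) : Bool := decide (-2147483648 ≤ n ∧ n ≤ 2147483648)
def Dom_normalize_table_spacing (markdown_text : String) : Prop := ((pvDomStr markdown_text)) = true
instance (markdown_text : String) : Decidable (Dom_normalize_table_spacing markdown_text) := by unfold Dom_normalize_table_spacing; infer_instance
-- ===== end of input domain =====

-- B replaces A's lookahead at lines[idx+1] / re-inspection of normalized[-1] by a buffered
-- single forward pass (pending blanks + last_was_table flag); objective: alternative decomposition.

-- ===== PORT A =====
-- bool(normalized and normalized[-1].strip().startswith("|"))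
def pvPrevT (acc : List String) : Bool :=
  ((acc.getLast?).map (fun l => PySem.Str.startswith (PySem.Str.strip l) "|")).getD false

-- the for-loop over enumerate(lines): lookahead lines[idx+1] is the head of the remaining suffix
def pvGoA (acc : List String) : List String → List String
  | [] => acc
  | line :: rest =>
    let stripped := PySem.Str.strip line
    if PySem.Str.startswith stripped "|" then
      pvGoA (acc ++ [stripped]) rest
    else if stripped = "" then
      let next_line := PySem.Str.strip (rest.headD "")
      if pvPrevT acc && PySem.Str.startswith next_line "|" then
        pvGoA acc rest
      else
        pvGoA (acc ++ [line]) rest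
    else
      pvGoA (acc ++ [line]) rest

def normalize_table_spacing (markdown_text : String) : String :=
  PySem.Str.join "\n" (pvGoA [] (PySem.Str.splitlines markdown_text))

-- ===== PORT B =====
def pvGoB (out pending : List String) (lastT : Bool) : List String → List String
  | [] => out ++ pending
  | line :: rest =>
    let stripped := PySem.Str.strip line
    if PySem.Str.startswith stripped "|" then
      pvGoB ((if lastT && pending.length == 1 then out else out ++ pending) ++ [stripped]) [] true rest
    else if stripped = "" then
      pvGoB out (pending ++ [line]) lastT rest
    else
      pvGoB (out ++ pending ++ [line]) [] false rest

def normalize_table_spacing_alt (markdown_text : String) : String :=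
  PySem.Str.join "\n" (pvGoB [] [] false (PySem.Str.splitlines markdown_text))

-- ===== PRECONDITION & SPEC =====
def Spec_normalize_table_spacing (markdown_text : String) (out : String) : Prop := out = normalize_table_spacing_alt markdown_text
instance (markdown_text : String) (out : String) : Decidable (Spec_normalize_table_spacing markdown_text out) := by unfold Spec_normalize_table_spacing; infer_instance

-- ===== CLAIM (what is proved, stated in full; the proofs are below) =====
def Claim_equal_normalize_table_spacing : Prop := ∀ (markdown_text : String), Dom_normalize_table_spacing markdown_text → Spec_normalize_table_spacing markdown_text (normalize_table_spacing markdown_text)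

-- ===== LEMMAS AND PROOFS =====

theorem dropWhile_idem {α : Type} (p : α → Bool) (l : List α) :
    List.dropWhile p (List.dropWhile p l) = List.dropWhile p l := by
  induction l with
  | nil => rfl
  | cons a t ih =>
    by_cases h : p a = true
    · simp [h, ih]
    · simp [h]

theorem head_dropWhile_false {α : Type} (p : α → Bool) (l : List α) (a : α) (t : List α)
    (h : List.dropWhile p l = a :: t) : p a = false := by
  induction l with
  | nil => simp at h
  | cons b s ih =>
    by_cases hb : p b = true
    · exact ih (by simpa [List.dropWhile_cons, hb] using h)
    · rw [List.dropWhile_cons_of_neg hb] at h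
      cases h; simpa using hb

theorem lstrip_of_strip (cs : List Char) :
    PySem.Chars.lstrip (PySem.Chars.strip cs) = PySem.Chars.strip cs := by
  unfold PySem.Chars.strip PySem.Chars.rstrip PySem.Chars.lstrip
  cases hd : List.dropWhile PySem.Chars.isspace cs with
  | nil => simp
  | cons a t =>
    have ha : PySem.Chars.isspace a = false := head_dropWhile_false _ _ _ _ hd
    -- the reversed dropWhile result is a prefix of a :: t, so it is [] or starts with a
    have hpre : (List.dropWhile PySem.Chars.isspace (a :: t).reverse).reverse <+: (a :: t) := by
      simpa using (List.dropWhile_suffix (l := (a :: t).reverse) PySem.Chars.isspace).reverse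
    obtain ⟨u, hu⟩ := hpre
    cases hx : (List.dropWhile PySem.Chars.isspace (a :: t).reverse).reverse with
    | nil => simp
    | cons x xs =>
      rw [hx] at hu
      simp only [List.cons_append, List.cons.injEq] at hu
      rw [List.dropWhile_cons_of_neg (by rw [hu.1, ha]; simp)]

theorem rstrip_idem (cs : List Char) :
    PySem.Chars.rstrip (PySem.Chars.rstrip cs) = PySem.Chars.rstrip cs := by
  unfold PySem.Chars.rstrip
  rw [List.reverse_reverse, dropWhile_idem]

theorem strip_idem (s : String) : PySem.Str.strip (PySem.Str.strip s) = PySem.Str.strip s := by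
  apply String.toList_injective
  rw [PySem.Str.toList_strip, PySem.Str.toList_strip]
  show PySem.Chars.rstrip (PySem.Chars.lstrip (PySem.Chars.strip s.toList)) = _
  rw [lstrip_of_strip]
  show PySem.Chars.rstrip (PySem.Chars.rstrip (PySem.Chars.lstrip s.toList)) = _
  rw [rstrip_idem]
  rfl

-- is the head of the remaining input a table row?
def pvHeadT : List String → Bool
  | [] => false
  | l :: _ => PySem.Str.startswith (PySem.Str.strip l) "|"

theorem startswith_empty_bar : PySem.Str.startswith "" "|" = false := by decide

theorem prevT_snoc (out : List String) (x : String) :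
    pvPrevT (out ++ [x]) = PySem.Str.startswith (PySem.Str.strip x) "|" := by
  simp [pvPrevT]

theorem prevT_append_blanks (out pending : List String) (hne : pending ≠ [])
    (hb : ∀ p ∈ pending, PySem.Str.strip p = "") :
    pvPrevT (out ++ pending) = false := by
  have h2 : (out ++ pending).getLast? = pending.getLast? :=
    List.getLast?_append_of_ne_nil out hne
  rcases hpl : pending.getLast? with _ | l
  · exact absurd (List.getLast?_eq_none_iff.mp hpl) hne
  · simp only [pvPrevT, h2, hpl, Option.map_some, Option.getD_some]
    rw [hb l (List.mem_of_getLast? hpl), startswith_empty_bar]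

-- unfolding equations for the two loops
theorem pvGoA_table (acc : List String) (line : String) (rest : List String)
    (h : PySem.Str.startswith (PySem.Str.strip line) "|" = true) :
    pvGoA acc (line :: rest) = pvGoA (acc ++ [PySem.Str.strip line]) rest := by
  simp only [pvGoA]; rw [if_pos h]

theorem pvGoA_blank (acc : List String) (line : String) (rest : List String)
    (h2 : PySem.Str.strip line = "") :
    pvGoA acc (line :: rest)
      = if (pvPrevT acc && PySem.Str.startswith (PySem.Str.strip (rest.headD "")) "|") = true
        then pvGoA acc rest else pvGoA (acc ++ [line]) rest := by
  simp only [pvGoA, h2, startswith_empty_bar]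
  simp

theorem pvGoA_text (acc : List String) (line : String) (rest : List String)
    (h1 : PySem.Str.startswith (PySem.Str.strip line) "|" = false)
    (h2 : PySem.Str.strip line ≠ "") :
    pvGoA acc (line :: rest) = pvGoA (acc ++ [line]) rest := by
  simp only [pvGoA]; rw [if_neg (by rw [h1]; simp), if_neg h2]

theorem pvGoB_table (out pending : List String) (lastT : Bool) (line : String) (rest : List String)
    (h : PySem.Str.startswith (PySem.Str.strip line) "|" = true) :
    pvGoB out pending lastT (line :: rest)
      = pvGoB ((if lastT && pending.length == 1 then out else out ++ pending)
          ++ [PySem.Str.strip line]) [] true rest := by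
  simp only [pvGoB]; rw [if_pos h]

theorem pvGoB_blank (out pending : List String) (lastT : Bool) (line : String) (rest : List String)
    (h2 : PySem.Str.strip line = "") :
    pvGoB out pending lastT (line :: rest) = pvGoB out (pending ++ [line]) lastT rest := by
  simp only [pvGoB, h2, startswith_empty_bar]
  simp

theorem pvGoB_text (out pending : List String) (lastT : Bool) (line : String) (rest : List String)
    (h1 : PySem.Str.startswith (PySem.Str.strip line) "|" = false)
    (h2 : PySem.Str.strip line ≠ "") :
    pvGoB out pending lastT (line :: rest) = pvGoB (out ++ pending ++ [line]) [] false rest := by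
  simp only [pvGoB]; rw [if_neg (by rw [h1]; simp), if_neg h2]

theorem pvHeadT_cons (l : String) (r : List String) :
    pvHeadT (l :: r) = PySem.Str.startswith (PySem.Str.strip l) "|" := rfl

theorem headD_strip_eq_pvHeadT (rest : List String) :
    PySem.Str.startswith (PySem.Str.strip (rest.headD "")) "|" = pvHeadT rest := by
  cases rest with
  | nil => simpa [pvHeadT] using startswith_empty_bar
  | cons r rs => simp [pvHeadT]

-- the main invariant: B's deferred buffer corresponds to A's already-decided output
theorem goA_eq_goB (ls : List String) : ∀ (out pending : List String) (lastT : Bool),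
    (∀ p ∈ pending, PySem.Str.strip p = "") →
    pvPrevT out = lastT →
    pvGoA (out ++ (if lastT && pending.length == 1 && pvHeadT ls then [] else pending)) ls
      = pvGoB out pending lastT ls := by
  induction ls with
  | nil =>
    intro out pending lastT _ _
    simp [pvGoA, pvGoB, pvHeadT]
  | cons line rest ih =>
    intro out pending lastT hb hp
    by_cases htab : PySem.Str.startswith (PySem.Str.strip line) "|" = true
    · -- table row: B decides the fate of the buffered blanks now
      rw [pvGoB_table _ _ _ _ _ htab,
        pvGoA_table _ _ _ htab]
      have hstep := ih ((if lastT && pending.length == 1 then out else out ++ pending)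
          ++ [PySem.Str.strip line]) [] true
        (by simp)
        (by rw [prevT_snoc, strip_idem, htab])
      rw [ite_self, List.append_nil] at hstep
      rw [← hstep]
      congr 1
      rw [pvHeadT_cons, htab, Bool.and_true]
      by_cases hc : (lastT && pending.length == 1) = true
      · rw [if_pos hc, if_pos hc]; simp
      · rw [if_neg hc, if_neg hc]
    · have htab' : PySem.Str.startswith (PySem.Str.strip line) "|" = false :=
        Bool.eq_false_iff.mpr htab
      have hadj : (lastT && pending.length == 1 && pvHeadT (line :: rest))
          = false := by rw [pvHeadT_cons, htab']; simp
      rw [hadj, if_neg (by simp)]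
      by_cases hblank : PySem.Str.strip line = ""
      · -- blank line
        rw [pvGoA_blank _ _ _ hblank, pvGoB_blank _ _ _ _ _ hblank,
          headD_strip_eq_pvHeadT]
        rcases hpe : pending with _ | ⟨q, qs⟩
        · -- no pending blanks: A's prev_is_table is exactly lastT
          rw [List.append_nil, hp]
          have hstep := ih out [line] lastT (by simpa using hblank) hp
          by_cases hdrop : (lastT && pvHeadT rest) = true
          · rw [if_pos hdrop]
            rw [if_pos (by simpa using hdrop)] at hstep
            rw [List.append_nil] at hstep
            exact hstep
          · rw [if_neg hdrop]
            rw [if_neg (by simpa using hdrop)] at hstep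
            exact hstep
        · -- pending blanks exist: normalized[-1] is a blank, so A keeps this blank too
          have hne : pending ≠ [] := by rw [hpe]; simp
          rw [← hpe]
          rw [prevT_append_blanks out pending hne hb]
          rw [if_neg (by simp)]
          have hstep := ih out (pending ++ [line]) lastT
            (by intro p hpm
                rcases List.mem_append.mp hpm with h | h
                · exact hb p h
                · simp at h; rw [h]; exact hblank)
            hp
          rw [if_neg (by rw [hpe]; simp)] at hstep
          rw [← hstep, List.append_assoc]
      · -- ordinary text line
        rw [pvGoA_text _ _ _ htab' hblank, pvGoB_text _ _ _ _ _ htab' hblank]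
        have hstep := ih (out ++ pending ++ [line]) [] false
          (by simp)
          (by rw [prevT_snoc]; exact htab')
        rw [if_neg (by simp), List.append_nil] at hstep
        rw [← hstep, List.append_assoc]

-- ===== VERDICT (by name: the statement is the Claim_ definition above) =====
theorem normalize_table_spacing_spec : Claim_equal_normalize_table_spacing := by
  intro markdown_text _
  unfold Spec_normalize_table_spacing normalize_table_spacing normalize_table_spacing_alt
  congr 1
  have := goA_eq_goB (PySem.Str.splitlines markdown_text) [] [] false (by simp) (by rfl)
  simpa using this
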